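-- pv_equiv track=rewrite | github.com/marmotton/utilities | unhide_b64.py | b64_unhide
-- ===== SOURCE A (Python) =====
-- def b64_unhide(str):
--     base64chars = 'ABCDEFGHIJKLMNOPQRSTUVWXYZabcdefghijklmnopqrstuvwxyz0123456789+/'
--
--     # Extract the hidden bits
--     bin_str = ''
--     for line in str.split('\n'):
--         n_equals = line.count('=')
--         n_hidden_bits = 2 * n_equals
--
--         if n_hidden_bits:
--             last_b64_value = base64chars.index(line[-n_equals - 1])
--             hidden_bits = last_b64_value & (2 ** n_hidden_bits - 1)
--
--             bin_str += "{:0{}b}".format(hidden_bits, n_hidden_bits)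
--
--     return bin_str_to_ascii(bin_str)
--
-- def bin_str_to_ascii(bin_str):
--     # Split the bits into bytes and convert them into an ascii string
--     out_str = ''
--     for i in range(0, len(bin_str), 8):
--         byte_str = bin_str[i:i + 8]  # the byte as a string of '0' and '1'
--         number = int(byte_str, 2)  # the byte
--
--         out_str += chr(number)
--
--     return out_str
-- ===== SOURCE B (Python) =====
-- def b64_unhide(str):
--     # One fused pass: an integer bit-buffer replaces A's intermediate '0'/'1' string and second chunking pass.
--     base64chars = 'ABCDEFGHIJKLMNOPQRSTUVWXYZabcdefghijklmnopqrstuvwxyz0123456789+/'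
--
--     out = []
--     val = 0
--     nbits = 0
--     for line in str.split('\n'):
--         n_equals = line.count('=')
--         if n_equals:
--             n_hidden = 2 * n_equals
--             bits = base64chars.index(line[-n_equals - 1]) & ((1 << n_hidden) - 1)
--             val = (val << n_hidden) | bits
--             nbits += n_hidden
--             while nbits >= 8:
--                 nbits -= 8
--                 out.append(chr(val >> nbits))
--                 val &= (1 << nbits) - 1
--     if nbits:
--         out.append(chr(val))
--     return ''.join(out)
-- ===== Notes on version B (the rewrite author's own statement) =====
-- stated objective: alternative
-- what changed: Fused A's two passes (build an intermediate bit-character string line by line, then re-scan it eight characters at a time and re-parse each chunk with int(s,2)) into a single pass over the lines that keeps the pending bits in an integer bit-buffer (val, nbits) and emits a byte whenever 8 bits are available; no intermediate bit string is built.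
import Mathlib
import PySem

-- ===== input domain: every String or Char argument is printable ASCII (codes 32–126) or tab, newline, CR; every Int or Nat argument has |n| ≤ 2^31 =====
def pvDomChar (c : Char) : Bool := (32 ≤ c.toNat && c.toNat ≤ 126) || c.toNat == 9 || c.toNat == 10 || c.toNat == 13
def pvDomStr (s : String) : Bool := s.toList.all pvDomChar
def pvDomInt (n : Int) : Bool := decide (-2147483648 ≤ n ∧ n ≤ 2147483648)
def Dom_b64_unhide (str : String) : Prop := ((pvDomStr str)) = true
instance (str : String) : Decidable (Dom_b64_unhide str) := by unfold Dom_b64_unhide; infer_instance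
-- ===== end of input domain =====

-- B fuses A's two passes (build a '0'/'1' string, then re-chunk it into bytes) into one pass
-- over the lines with an integer bit-buffer; same return value on every input where A returns.

def pvB64chars : List Char :=
  "ABCDEFGHIJKLMNOPQRSTUVWXYZabcdefghijklmnopqrstuvwxyz0123456789+/".toList

-- ===== PORT A =====
-- "{:0{}b}".format(n, w): binary digits of n zero-padded to width w.
-- Exact for n < 2 ^ w and 0 < w — the only way A calls it (n is masked to w bits, w = 2*n_equals > 0).
def pvBinFmt : Nat → Nat → List Char
  | _, 0 => []
  | n, w + 1 => pvBinFmt (n / 2) w ++ [if n % 2 = 1 then '1' else '0']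

-- int(s, 2): exact for the nonempty strings of '0'/'1' chars A feeds it.
def pvBitsVal (bs : List Char) : Nat :=
  bs.foldl (fun a c => 2 * a + (if c = '1' then 1 else 0)) 0

-- bin_str_to_ascii: 'for i in range(0, len(bin_str), 8): out += chr(int(bin_str[i:i+8], 2))'
-- — each step consumes the slice [i:i+8], i.e. the first 8 remaining chars.
def pvBinStrToAscii (bs : List Char) : List Char :=
  if h : bs = [] then []
  else Char.ofNat (pvBitsVal (bs.take 8)) :: pvBinStrToAscii (bs.drop 8)
termination_by bs.length
decreasing_by have : 0 < bs.length := List.length_pos_iff.mpr h; simp [List.length_drop]; omega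

def b64_unhide (str : String) : String :=
  let bin_str := (PySem.Chars.splitOn str.toList ['\n']).foldl (fun bin_str line =>
    let n_equals := PySem.Chars.count line ['=']
    let n_hidden_bits := 2 * n_equals
    if n_hidden_bits ≠ 0 then
      match PySem.List.pyGet? line (-(n_equals : Int) - 1) with
      | none => bin_str        -- Python: IndexError (excluded by Pre_)
      | some ch =>
        match PySem.List.index? pvB64chars ch with  -- str.index of the 1-char string = first index
        | none => bin_str      -- Python: ValueError (excluded by Pre_)
        | some last_b64_value =>
          bin_str ++ pvBinFmt (last_b64_value &&& (2 ^ n_hidden_bits - 1)) n_hidden_bits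
    else bin_str) []
  String.mk (pvBinStrToAscii bin_str)

-- ===== PORT B =====
-- 'while nbits >= 8: nbits -= 8; out.append(chr(val >> nbits)); val &= (1 << nbits) - 1'
def pvEmit (out : List Char) (val nbits : Nat) : List Char × Nat × Nat :=
  if h : 8 ≤ nbits then
    pvEmit (out ++ [Char.ofNat (val >>> (nbits - 8))]) (val &&& (1 <<< (nbits - 8) - 1)) (nbits - 8)
  else (out, val, nbits)
termination_by nbits
decreasing_by omega

-- All buffer values are nonnegative Python ints, so Nat shifts/masks are exact here.
def b64_unhide_alt (str : String) : String :=
  let st := (PySem.Chars.splitOn str.toList ['\n']).foldl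
    (fun (st : List Char × Nat × Nat) line =>
      let n_equals := PySem.Chars.count line ['=']
      if n_equals ≠ 0 then
        match PySem.List.pyGet? line (-(n_equals : Int) - 1) with
        | none => st           -- Python: IndexError (excluded by Pre_)
        | some ch =>
          match PySem.List.index? pvB64chars ch with
          | none => st         -- Python: ValueError (excluded by Pre_)
          | some idx =>
            let n_hidden := 2 * n_equals
            let bits := idx &&& (1 <<< n_hidden - 1)
            pvEmit st.1 ((st.2.1 <<< n_hidden) ||| bits) (st.2.2 + n_hidden)
      else st) ([], 0, 0)
  String.mk (if st.2.2 ≠ 0 then st.1 ++ [Char.ofNat st.2.1] else st.1)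

-- ===== PRECONDITION & SPEC =====
-- Pre_ excludes exactly the inputs where Python A raises: a line containing '=' whose char at
-- index -(n_equals+1) is out of range (IndexError) or not a base64 character (ValueError).
def Pre_b64_unhide (str : String) : Prop :=
  ∀ line ∈ PySem.Chars.splitOn str.toList ['\n'],
    PySem.Chars.count line ['='] = 0 ∨
    ((PySem.List.pyGet? line (-(PySem.Chars.count line ['='] : Int) - 1)).any
      fun c => decide (c ∈ pvB64chars)) = true
instance (str : String) : Decidable (Pre_b64_unhide str) := by
  unfold Pre_b64_unhide; infer_instance

def pvWitness_b64_unhide : String := "TQ==\nYQ==\nQQ=="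

def Spec_b64_unhide (str : String) (out : String) : Prop := out = b64_unhide_alt str
instance (str : String) (out : String) : Decidable (Spec_b64_unhide str out) := by
  unfold Spec_b64_unhide; infer_instance

-- ===== CLAIM (what is proved, stated in full; the proofs are below) =====
def Claim_equal_b64_unhide : Prop :=
  ∀ (str : String), Dom_b64_unhide str → Pre_b64_unhide str →
    Spec_b64_unhide str (b64_unhide str)

-- ===== LEMMAS AND PROOFS =====

-- the bit chunk one line contributes (empty in the branches Python raises on / no '=')
def pvChunk (line : List Char) : List Char :=
  let n := PySem.Chars.count line ['=']
  if n ≠ 0 then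
    match PySem.List.pyGet? line (-(n : Int) - 1) with
    | none => []
    | some ch =>
      match PySem.List.index? pvB64chars ch with
      | none => []
      | some idx => pvBinFmt (idx &&& (2 ^ (2 * n) - 1)) (2 * n)
  else []

-- complete 8-bit chunks of a bit string, and the (< 8 bit) remainder
def pvBytes8 (bs : List Char) : List Char :=
  if h : 8 ≤ bs.length then Char.ofNat (pvBitsVal (bs.take 8)) :: pvBytes8 (bs.drop 8) else []
termination_by bs.length
decreasing_by simp [List.length_drop]; omega

def pvRem8 (bs : List Char) : List Char :=
  if h : 8 ≤ bs.length then pvRem8 (bs.drop 8) else bs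
termination_by bs.length
decreasing_by simp [List.length_drop]; omega

theorem pvShlOr : ∀ (k a b : Nat), b < 2 ^ k → a * 2 ^ k ||| b = a * 2 ^ k + b := by
  intro k
  induction k with
  | zero => intro a b hb; interval_cases b <;> simp
  | succ k ih =>
    intro a b hb
    have hd : Nat.bit (b.bodd) (b.div2) = b := Nat.bit_bodd_div2 b
    have ha : Nat.bit false (a * 2 ^ k) = a * 2 ^ (k + 1) := by simp [Nat.bit]; ring
    have hb2 : b.div2 = b / 2 := Nat.div2_val b
    rw [← hd, ← ha, Nat.lor_bit, ih a b.div2 (by omega)]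
    have hbo := Nat.bodd_add_div2 b
    cases h : b.bodd <;> simp [Nat.bit] <;> simp [h] at hbo <;> omega

theorem pvBinFmt_length (n w : Nat) : (pvBinFmt n w).length = w := by
  induction w generalizing n with
  | zero => rfl
  | succ w ih => simp [pvBinFmt, ih]

theorem pvBitsVal_foldl (ys : List Char) :
    ∀ a : Nat, ys.foldl (fun a c => 2 * a + (if c = '1' then 1 else 0)) a
      = a * 2 ^ ys.length + pvBitsVal ys := by
  induction ys with
  | nil => intro a; simp [pvBitsVal]
  | cons c ys ih =>
    intro a
    simp only [List.foldl_cons, List.length_cons]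
    rw [ih (2 * a + (if c = '1' then 1 else 0))]
    have h2 : pvBitsVal (c :: ys)
        = (2 * 0 + (if c = '1' then 1 else 0)) * 2 ^ ys.length + pvBitsVal ys := by
      simp only [pvBitsVal, List.foldl_cons]
      exact ih _
    rw [h2]; ring

theorem pvBitsVal_append (xs ys : List Char) :
    pvBitsVal (xs ++ ys) = pvBitsVal xs * 2 ^ ys.length + pvBitsVal ys := by
  simp only [pvBitsVal, List.foldl_append]
  rw [pvBitsVal_foldl ys]; rfl

theorem pvBitsVal_lt (bs : List Char) : pvBitsVal bs < 2 ^ bs.length := by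
  induction bs with
  | nil => simp [pvBitsVal]
  | cons c ys ih =>
    have h2 : pvBitsVal (c :: ys)
        = (2 * 0 + (if c = '1' then 1 else 0)) * 2 ^ ys.length + pvBitsVal ys := by
      simp only [pvBitsVal, List.foldl_cons]
      exact pvBitsVal_foldl ys _
    rw [h2]
    have hp : 0 < 2 ^ ys.length := by positivity
    simp only [List.length_cons, pow_succ]
    split_ifs <;> omega

theorem pvBitsVal_pvBinFmt (n w : Nat) (h : n < 2 ^ w) : pvBitsVal (pvBinFmt n w) = n := by
  induction w generalizing n with
  | zero => simp at h; simp [h, pvBinFmt, pvBitsVal]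
  | succ w ih =>
    have hn : n / 2 < 2 ^ w := by
      rw [pow_succ] at h; omega
    simp only [pvBinFmt]
    rw [pvBitsVal_append, ih (n / 2) hn]
    have hm := Nat.div_add_mod n 2
    have : pvBitsVal [if n % 2 = 1 then '1' else '0'] = n % 2 := by
      rcases Nat.mod_two_eq_zero_or_one n with h2 | h2 <;> simp [h2, pvBitsVal]
    simp only [List.length_cons, List.length_nil, this]
    omega

theorem pvRem8_length_lt (bs : List Char) : (pvRem8 bs).length < 8 := by
  fun_induction pvRem8 bs with
  | case1 bs h ih => exact ih
  | case2 bs h => omega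

theorem pvBytes8_of_lt (bs : List Char) (h : bs.length < 8) : pvBytes8 bs = [] := by
  rw [pvBytes8]; exact dif_neg (by omega)

theorem pvRem8_of_lt (bs : List Char) (h : bs.length < 8) : pvRem8 bs = bs := by
  rw [pvRem8]; exact dif_neg (by omega)

theorem pvBytes8_of_ge (bs : List Char) (h : 8 ≤ bs.length) :
    pvBytes8 bs = Char.ofNat (pvBitsVal (bs.take 8)) :: pvBytes8 (bs.drop 8) := by
  rw [pvBytes8]; exact dif_pos h

theorem pvRem8_of_ge (bs : List Char) (h : 8 ≤ bs.length) :
    pvRem8 bs = pvRem8 (bs.drop 8) := by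
  rw [pvRem8]; exact dif_pos h

theorem pvBinStrToAscii_cons (bs : List Char) (h : bs ≠ []) :
    pvBinStrToAscii bs
      = Char.ofNat (pvBitsVal (bs.take 8)) :: pvBinStrToAscii (bs.drop 8) := by
  rw [pvBinStrToAscii]; exact dif_neg h

theorem pvBinStrToAscii_eq (bs : List Char) :
    pvBinStrToAscii bs = pvBytes8 bs ++
      (if pvRem8 bs = [] then [] else [Char.ofNat (pvBitsVal (pvRem8 bs))]) := by
  fun_induction pvRem8 bs with
  | case1 bs h ih =>
    have hne : bs ≠ [] := by intro he; subst he; simp at h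
    rw [pvBinStrToAscii_cons bs hne, ih, pvBytes8_of_ge bs h]
    simp
  | case2 bs h =>
    by_cases he : bs = []
    · subst he; simp [pvBinStrToAscii, pvBytes8]
    · have ht : bs.take 8 = bs := List.take_of_length_le (by omega)
      have hd : pvBinStrToAscii (bs.drop 8) = [] := by
        have : bs.drop 8 = [] := by
          apply List.eq_nil_of_length_eq_zero; simp; omega
        rw [this, pvBinStrToAscii]; simp
      rw [pvBinStrToAscii_cons bs he, hd, ht]
      rw [pvBytes8_of_lt bs (by omega)]
      simp [he]

theorem pvChunks_append (w X : List Char) :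
    pvBytes8 (w ++ X) = pvBytes8 w ++ pvBytes8 (pvRem8 w ++ X) ∧
    pvRem8 (w ++ X) = pvRem8 (pvRem8 w ++ X) := by
  fun_induction pvRem8 w with
  | case1 w h ih =>
    have h8 : 8 ≤ (w ++ X).length := by simp; omega
    constructor
    · rw [pvBytes8_of_ge (w ++ X) h8,
        List.take_append_of_le_length h, List.drop_append_of_le_length h]
      rw [ih.1, pvBytes8_of_ge w h]
      simp
    · rw [pvRem8_of_ge (w ++ X) h8, List.drop_append_of_le_length h]
      rw [ih.2]
  | case2 w h =>
    simp [pvBytes8_of_lt w (by omega)]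

theorem pvEmit_spec (w : List Char) : ∀ out : List Char,
    pvEmit out (pvBitsVal w) w.length
      = (out ++ pvBytes8 w, pvBitsVal (pvRem8 w), (pvRem8 w).length) := by
  fun_induction pvRem8 w with
  | case1 w h ih =>
    intro out
    have hw : w = w.take 8 ++ w.drop 8 := (List.take_append_drop 8 w).symm
    have hlt : pvBitsVal (w.drop 8) < 2 ^ (w.drop 8).length := pvBitsVal_lt _
    have hval : pvBitsVal w
        = pvBitsVal (w.take 8) * 2 ^ (w.drop 8).length + pvBitsVal (w.drop 8) := by
      conv_lhs => rw [hw]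
      exact pvBitsVal_append _ _
    have hlen : (w.drop 8).length = w.length - 8 := by simp
    rw [pvEmit]
    simp only [h, dif_pos]
    have hdivv : pvBitsVal w >>> (w.length - 8) = pvBitsVal (w.take 8) := by
      rw [Nat.shiftRight_eq_div_pow, hval, ← hlen]
      rw [Nat.mul_comm (pvBitsVal (w.take 8)), Nat.mul_add_div (by positivity)]
      rw [Nat.div_eq_of_lt hlt, Nat.add_zero]
    have hmodv : pvBitsVal w &&& (1 <<< (w.length - 8) - 1) = pvBitsVal (w.drop 8) := by
      rw [Nat.one_shiftLeft, Nat.and_two_pow_sub_one_eq_mod, hval, ← hlen]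
      rw [Nat.mul_comm (pvBitsVal (w.take 8)), Nat.mul_add_mod]
      exact Nat.mod_eq_of_lt hlt
    rw [hdivv, hmodv, ← hlen, ih]
    rw [pvBytes8_of_ge w h]
    simp
  | case2 w h =>
    intro out
    rw [pvEmit, dif_neg h]
    simp [pvBytes8_of_lt w (by omega)]

-- A's loop builds exactly the concatenation of the per-line chunks
theorem pvAfold (lines : List (List Char)) : ∀ acc : List Char,
    lines.foldl (fun bin_str line =>
      let n_equals := PySem.Chars.count line ['=']
      let n_hidden_bits := 2 * n_equals
      if n_hidden_bits ≠ 0 then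
        match PySem.List.pyGet? line (-(n_equals : Int) - 1) with
        | none => bin_str
        | some ch =>
          match PySem.List.index? pvB64chars ch with
          | none => bin_str
          | some last_b64_value =>
            bin_str ++ pvBinFmt (last_b64_value &&& (2 ^ n_hidden_bits - 1)) n_hidden_bits
      else bin_str) acc = acc ++ (lines.map pvChunk).flatten := by
  induction lines with
  | nil => intro acc; simp
  | cons l ls ih =>
    intro acc
    simp only [List.foldl_cons, List.map_cons, List.flatten_cons]
    rw [ih]
    have hstep : ∀ acc : List Char,
        (let n_equals := PySem.Chars.count l ['='];
         let n_hidden_bits := 2 * n_equals;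
         if n_hidden_bits ≠ 0 then
           match PySem.List.pyGet? l (-(n_equals : Int) - 1) with
           | none => acc
           | some ch =>
             match PySem.List.index? pvB64chars ch with
             | none => acc
             | some last_b64_value =>
               acc ++ pvBinFmt (last_b64_value &&& (2 ^ n_hidden_bits - 1)) n_hidden_bits
           else acc) = acc ++ pvChunk l := by
      intro acc
      by_cases hn : PySem.Chars.count l ['='] = 0
      · simp [pvChunk, hn]
      · have h2 : 2 * PySem.Chars.count l ['='] ≠ 0 := by omega
        cases hg : PySem.List.pyGet? l (-(PySem.Chars.count l ['='] : Int) - 1) with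
        | none => simp [pvChunk, hn, h2, hg]
        | some ch =>
          cases hi : PySem.List.index? pvB64chars ch with
          | none =>
            rw [PySem.List.index?_eq_idxOf?] at hi
            simp [pvChunk, hn, h2, hg, hi]
          | some v =>
            rw [PySem.List.index?_eq_idxOf?] at hi
            simp [pvChunk, hn, h2, hg, hi]
    rw [hstep, List.append_assoc]

-- B's loop step, named for the proofs (identical to the lambda in b64_unhide_alt)
def pvBstep (st : List Char × Nat × Nat) (line : List Char) : List Char × Nat × Nat :=
  let n_equals := PySem.Chars.count line ['=']
  if n_equals ≠ 0 then
    match PySem.List.pyGet? line (-(n_equals : Int) - 1) with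
    | none => st
    | some ch =>
      match PySem.List.index? pvB64chars ch with
      | none => st
      | some idx =>
        let n_hidden := 2 * n_equals
        let bits := idx &&& (1 <<< n_hidden - 1)
        pvEmit st.1 ((st.2.1 <<< n_hidden) ||| bits) (st.2.2 + n_hidden)
  else st

-- B's loop invariant: the buffer holds exactly the not-yet-emitted tail bits
theorem pvBfold (lines : List (List Char)) : ∀ (out p : List Char), p.length < 8 →
    lines.foldl pvBstep (out, pvBitsVal p, p.length)
    = (out ++ pvBytes8 (p ++ (lines.map pvChunk).flatten),
       pvBitsVal (pvRem8 (p ++ (lines.map pvChunk).flatten)),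
       (pvRem8 (p ++ (lines.map pvChunk).flatten)).length) := by
  induction lines with
  | nil =>
    intro out p hp
    simp only [List.foldl_nil, List.map_nil, List.flatten_nil, List.append_nil]
    rw [pvBytes8_of_lt p hp, pvRem8_of_lt p hp]
    simp
  | cons l ls ih =>
    intro out p hp
    simp only [List.foldl_cons, List.map_cons, List.flatten_cons]
    by_cases hn : PySem.Chars.count l ['='] = 0
    · have hstep : pvBstep (out, pvBitsVal p, p.length) l = (out, pvBitsVal p, p.length) := by
        simp [pvBstep, hn]
      have hc : pvChunk l = [] := by simp [pvChunk, hn]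
      rw [hstep, ih out p hp, hc]
      simp
    · cases hg : PySem.List.pyGet? l (-(PySem.Chars.count l ['='] : Int) - 1) with
      | none =>
        have hstep : pvBstep (out, pvBitsVal p, p.length) l = (out, pvBitsVal p, p.length) := by
          simp [pvBstep, hn, hg]
        have hc : pvChunk l = [] := by simp [pvChunk, hn, hg]
        rw [hstep, ih out p hp, hc]
        simp
      | some ch =>
        cases hi : PySem.List.index? pvB64chars ch with
        | none =>
          rw [PySem.List.index?_eq_idxOf?] at hi
          have hstep : pvBstep (out, pvBitsVal p, p.length) l = (out, pvBitsVal p, p.length) := by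
            simp [pvBstep, hn, hg, hi]
          have hc : pvChunk l = [] := by simp [pvChunk, hn, hg, hi]
          rw [hstep, ih out p hp, hc]
          simp
        | some idx =>
          rw [PySem.List.index?_eq_idxOf?] at hi
          set n := PySem.Chars.count l ['='] with hndef
          have hstep : pvBstep (out, pvBitsVal p, p.length) l
              = pvEmit out ((pvBitsVal p <<< (2 * n)) ||| (idx &&& (1 <<< (2 * n) - 1)))
                  (p.length + 2 * n) := by
            simp [pvBstep, ← hndef, hn, hg, hi]
          have h2 : (2 : Nat) ^ (2 * n) - 1 = 1 <<< (2 * n) - 1 := by rw [Nat.one_shiftLeft]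
          have hc : pvChunk l
              = pvBinFmt (idx &&& (2 ^ (2 * n) - 1)) (2 * n) := by
            simp [pvChunk, ← hndef, hn, hg, hi]
          set m := idx &&& (2 ^ (2 * n) - 1) with hmdef
          have hmlt : m < 2 ^ (2 * n) := by
            rw [hmdef, Nat.and_two_pow_sub_one_eq_mod]
            exact Nat.mod_lt _ (by positivity)
          have hclen : (pvChunk l).length = 2 * n := by rw [hc, pvBinFmt_length]
          have hcval : pvBitsVal (pvChunk l) = m := by rw [hc]; exact pvBitsVal_pvBinFmt _ _ hmlt
          have hpush : (pvBitsVal p <<< (2 * n)) ||| (idx &&& (1 <<< (2 * n) - 1))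
              = pvBitsVal (p ++ pvChunk l) := by
            rw [← h2, ← hmdef, Nat.shiftLeft_eq, pvShlOr (2 * n) _ m hmlt]
            rw [pvBitsVal_append, hclen, hcval]
          have hlen2 : p.length + 2 * n = (p ++ pvChunk l).length := by simp [hclen]
          rw [hstep, hpush, hlen2, pvEmit_spec (p ++ pvChunk l) out]
          rw [ih (out ++ pvBytes8 (p ++ pvChunk l)) (pvRem8 (p ++ pvChunk l))
                (pvRem8_length_lt _)]
          have hass := pvChunks_append (p ++ pvChunk l) ((ls.map pvChunk).flatten)
          rw [List.append_assoc] at hass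
          rw [List.append_assoc out, ← hass.1, ← hass.2]

-- ===== VERDICT (by name: the statement is the Claim_ definition above) =====
theorem b64_unhide_spec : Claim_equal_b64_unhide := by
  unfold Claim_equal_b64_unhide
  intro str _ _
  unfold Spec_b64_unhide b64_unhide b64_unhide_alt
  simp only
  rw [pvAfold]
  have hfun : ∀ (init : List Char × Nat × Nat) (L : List (List Char)),
      L.foldl (fun (st : List Char × Nat × Nat) line =>
        let n_equals := PySem.Chars.count line ['=']
        if n_equals ≠ 0 then
          match PySem.List.pyGet? line (-(n_equals : Int) - 1) with
          | none => st
          | some ch =>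
            match PySem.List.index? pvB64chars ch with
            | none => st
            | some idx =>
              let n_hidden := 2 * n_equals
              let bits := idx &&& (1 <<< n_hidden - 1)
              pvEmit st.1 ((st.2.1 <<< n_hidden) ||| bits) (st.2.2 + n_hidden)
        else st) init = L.foldl pvBstep init := fun _ _ => rfl
  rw [hfun]
  rw [show ((([] : List Char), (0 : Nat), (0 : Nat)) : List Char × Nat × Nat)
      = (([] : List Char), pvBitsVal [], ([] : List Char).length) from rfl]
  rw [pvBfold _ _ [] (by simp)]
  simp only [List.nil_append]
  rw [pvBinStrToAscii_eq]
  set flat := ((PySem.Chars.splitOn str.toList ['\n']).map pvChunk).flatten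
  by_cases hr : pvRem8 flat = []
  · simp [hr]
  · have : (pvRem8 flat).length ≠ 0 := by
      intro h; exact hr (List.eq_nil_of_length_eq_zero h)
    simp [hr, this]
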